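-- pv_equiv track=rewrite | github.com/arquam07/agentic-rag | app/ingestion/chunker.py | _extract_last_paragraph
-- ===== SOURCE A (Python) =====
-- def _extract_last_paragraph(lines: list[str]) -> str:
--     """
--     Pull the last non-empty paragraph from a list of lines.
--     A paragraph is a contiguous block of non-empty lines at the end.
--     """
--     # Strip trailing empty lines
--     trimmed = list(lines)
--     while trimmed and not trimmed[-1].strip():
--         trimmed.pop()
--
--     if not trimmed:
--         return ""
--
--     # Walk backwards to find paragraph start
--     para_lines = []
--     for line in reversed(trimmed):
--         if not line.strip():
--             break
--         para_lines.append(line)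
--
--     para_lines.reverse()
--     return "\n".join(para_lines)
-- ===== SOURCE B (Python) =====
-- def _extract_last_paragraph(lines: list[str]) -> str:
--     """
--     Single forward pass: accumulate non-empty lines into `current`;
--     a blank line closes the current block, remembering it as `last`.
--     """
--     current = []
--     last = []
--     for line in lines:
--         if line.strip():
--             current.append(line)
--         else:
--             if current:
--                 last = current
--                 current = []
--     if current:
--         last = current
--     return "\n".join(last)
-- ===== Notes on version B (the rewrite author's own statement) =====
-- stated objective: alternative
-- what changed: Replaced the pop-trailing-blanks-then-backward-scan-then-reverse approach with a single forward pass that accumulates the current non-blank block and remembers the last completed one.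
import Mathlib
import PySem

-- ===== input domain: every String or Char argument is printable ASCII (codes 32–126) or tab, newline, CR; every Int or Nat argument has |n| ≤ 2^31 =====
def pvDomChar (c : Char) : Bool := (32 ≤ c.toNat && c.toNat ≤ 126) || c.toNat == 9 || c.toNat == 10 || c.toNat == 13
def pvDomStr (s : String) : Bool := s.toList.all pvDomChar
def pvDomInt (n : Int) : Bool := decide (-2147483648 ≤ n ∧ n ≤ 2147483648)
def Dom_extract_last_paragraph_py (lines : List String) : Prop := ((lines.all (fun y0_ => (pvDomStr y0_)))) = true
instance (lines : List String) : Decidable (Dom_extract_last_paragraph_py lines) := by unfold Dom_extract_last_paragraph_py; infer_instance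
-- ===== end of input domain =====

-- B replaces A's trim-then-backward-scan with a single forward pass; objective: alternative decomposition (same cost).

-- the common emptiness test: `not line.strip()` in Python
def pvBlank (l : String) : Bool := PySem.Str.strip l == ""

-- ===== PORT A =====
-- `while trimmed and not trimmed[-1].strip(): trimmed.pop()`, acting on the REVERSED list
def pvPopBlanks (rev : List String) : List String :=
  match rev with
  | [] => []
  | h :: t => if pvBlank h then pvPopBlanks t else h :: t

def extract_last_paragraph_py (lines : List String) : String :=
  let trimmedRev := pvPopBlanks lines.reverse
  if trimmedRev = [] then ""
  else
    -- `for line in reversed(trimmed): if not line.strip(): break; para_lines.append(line)`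
    let para_lines := trimmedRev.takeWhile (fun l => !pvBlank l)
    PySem.Str.join "\n" para_lines.reverse

-- ===== PORT B =====
-- one forward pass over `lines` with state (current, last)
def pvStep (st : List String × List String) (line : String) : List String × List String :=
  if !pvBlank line then (st.1 ++ [line], st.2)
  else if st.1 ≠ [] then ([], st.1) else st

def extract_last_paragraph_py_alt (lines : List String) : String :=
  let st := lines.foldl pvStep ([], [])
  let final := if st.1 ≠ [] then st.1 else st.2
  PySem.Str.join "\n" final

-- ===== PRECONDITION & SPEC =====
def Spec_extract_last_paragraph_py (lines : List String) (out : String) : Prop := out = extract_last_paragraph_py_alt lines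
instance (lines : List String) (out : String) : Decidable (Spec_extract_last_paragraph_py lines out) := by unfold Spec_extract_last_paragraph_py; infer_instance

-- ===== CLAIM (what is proved, stated in full; the proofs are below) =====
def Claim_equal_extract_last_paragraph_py : Prop := ∀ (lines : List String), Dom_extract_last_paragraph_py lines → Spec_extract_last_paragraph_py lines (extract_last_paragraph_py lines)

-- ===== LEMMAS AND PROOFS =====

-- the list B joins, as a function of the fold state
def pvFinal (st : List String × List String) : List String :=
  if st.1 ≠ [] then st.1 else st.2

-- loop invariant, proved by induction from the right:
-- the fold's `current` is the trailing non-blank block, and its finalized value is A's paragraph list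
theorem pv_inv (xs : List String) :
    (xs.foldl pvStep ([], [])).1 = (xs.reverse.takeWhile (fun l => !pvBlank l)).reverse ∧
    pvFinal (xs.foldl pvStep ([], [])) = ((pvPopBlanks xs.reverse).takeWhile (fun l => !pvBlank l)).reverse := by
  induction xs using List.reverseRecOn with
  | nil => simp [pvFinal, pvPopBlanks]
  | append_singleton xs x ih =>
    obtain ⟨ih1, ih2⟩ := ih
    rw [List.foldl_append]
    simp only [List.foldl_cons, List.foldl_nil, List.reverse_append, List.reverse_cons,
      List.reverse_nil, List.nil_append, List.cons_append, List.nil_append]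
    by_cases hb : pvBlank x
    · constructor
      · simp only [pvStep, hb, Bool.not_true, Bool.false_eq_true, if_false, List.takeWhile]
        split_ifs with h <;> simp_all
      · simp only [pvStep, hb, Bool.not_true, Bool.false_eq_true, if_false]
        simp only [pvPopBlanks, hb, if_true]
        split_ifs with h1
        · -- current nonempty: it is saved as last
          rw [← ih2]
          simp [pvFinal, h1]
        · -- current empty: state unchanged
          exact ih2
    · constructor
      · simp [pvStep, hb, List.takeWhile, ih1]
      · simp only [pvStep, hb, Bool.not_false, if_true]
        have hne : (xs.foldl pvStep ([], [])).1 ++ [x] ≠ [] := by simp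
        simp only [pvFinal, hne, if_pos, ne_eq, not_false_iff]
        simp [pvPopBlanks, hb, ih1]

-- ===== VERDICT (by name: the statement is the Claim_ definition above) =====
theorem extract_last_paragraph_py_spec : Claim_equal_extract_last_paragraph_py := by
  intro lines _
  show extract_last_paragraph_py lines = extract_last_paragraph_py_alt lines
  have h := (pv_inv lines).2
  unfold extract_last_paragraph_py extract_last_paragraph_py_alt
  simp only []
  rw [show (if (lines.foldl pvStep ([], [])).1 ≠ [] then (lines.foldl pvStep ([], [])).1
        else (lines.foldl pvStep ([], [])).2) = pvFinal (lines.foldl pvStep ([], [])) from rfl, h]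
  split_ifs with he
  · rw [he]; simp [PySem.Str.join, PySem.Chars.join, List.intercalate]
  · rfl
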